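-- pv_equiv track=rewrite | github.com/jmp1533/FortunaPick | lottery/analyzer.py | _get_group_concentration_key
-- ===== SOURCE A (Python) =====
-- def _get_group_concentration_key(numbers):
--     decades = {
--         '1-10': sum(1 for n in numbers if 1 <= n <= 10),
--         '11-20': sum(1 for n in numbers if 11 <= n <= 20),
--         '21-30': sum(1 for n in numbers if 21 <= n <= 30),
--         '31-40': sum(1 for n in numbers if 31 <= n <= 40),
--         '41-45': sum(1 for n in numbers if 41 <= n <= 45),
--     }
--     return '-'.join(str(decades[key]) for key in sorted(decades.keys()))
-- ===== SOURCE B (Python) =====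
-- def _get_group_concentration_key(numbers):
--     counts = [0, 0, 0, 0, 0]
--     for n in numbers:
--         if 1 <= n <= 10:
--             counts[0] += 1
--         elif 11 <= n <= 20:
--             counts[1] += 1
--         elif 21 <= n <= 30:
--             counts[2] += 1
--         elif 31 <= n <= 40:
--             counts[3] += 1
--         elif 41 <= n <= 45:
--             counts[4] += 1
--     return '-'.join(str(c) for c in counts)
-- ===== Notes on version B (the rewrite author's own statement) =====
-- stated objective: simpler
-- what changed: Replaces five separate generator-sum passes plus a dict/sorted-keys/join with one pass over the numbers maintaining five counters, joined directly.
import Mathlib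
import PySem

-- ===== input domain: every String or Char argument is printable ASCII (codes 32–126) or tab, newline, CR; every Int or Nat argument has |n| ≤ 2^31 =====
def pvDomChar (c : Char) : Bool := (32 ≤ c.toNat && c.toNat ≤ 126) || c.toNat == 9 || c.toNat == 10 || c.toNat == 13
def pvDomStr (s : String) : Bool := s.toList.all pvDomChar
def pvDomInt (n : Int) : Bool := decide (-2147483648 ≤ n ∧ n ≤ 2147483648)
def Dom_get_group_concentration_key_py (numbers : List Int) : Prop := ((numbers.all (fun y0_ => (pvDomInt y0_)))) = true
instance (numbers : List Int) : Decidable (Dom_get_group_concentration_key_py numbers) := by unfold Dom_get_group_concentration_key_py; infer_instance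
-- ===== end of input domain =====

-- B replaces five counting passes + dict/sorted-keys with a single pass over a 5-tuple of counters (simpler decomposition; same bounds).

-- ===== PORT A =====
def get_group_concentration_key_py (numbers : List Int) : String :=
  let decades : PySem.Dict String Int := PySem.Dict.ofList
    [ ("1-10",  numbers.foldl (fun acc n => if 1 ≤ n ∧ n ≤ 10 then acc + 1 else acc) 0),
      ("11-20", numbers.foldl (fun acc n => if 11 ≤ n ∧ n ≤ 20 then acc + 1 else acc) 0),
      ("21-30", numbers.foldl (fun acc n => if 21 ≤ n ∧ n ≤ 30 then acc + 1 else acc) 0),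
      ("31-40", numbers.foldl (fun acc n => if 31 ≤ n ∧ n ≤ 40 then acc + 1 else acc) 0),
      ("41-45", numbers.foldl (fun acc n => if 41 ≤ n ∧ n ≤ 45 then acc + 1 else acc) 0) ]
  PySem.Str.join "-"
    ((PySem.List.sorted decades.keys (fun k => k) false).map
      (fun key => PySem.Int.toStr (decades.getD key 0)))

-- ===== PORT B =====
def pvStepB (c : Int × Int × Int × Int × Int) (n : Int) : Int × Int × Int × Int × Int :=
  if 1 ≤ n ∧ n ≤ 10 then (c.1 + 1, c.2.1, c.2.2.1, c.2.2.2.1, c.2.2.2.2)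
  else if 11 ≤ n ∧ n ≤ 20 then (c.1, c.2.1 + 1, c.2.2.1, c.2.2.2.1, c.2.2.2.2)
  else if 21 ≤ n ∧ n ≤ 30 then (c.1, c.2.1, c.2.2.1 + 1, c.2.2.2.1, c.2.2.2.2)
  else if 31 ≤ n ∧ n ≤ 40 then (c.1, c.2.1, c.2.2.1, c.2.2.2.1 + 1, c.2.2.2.2)
  else if 41 ≤ n ∧ n ≤ 45 then (c.1, c.2.1, c.2.2.1, c.2.2.2.1, c.2.2.2.2 + 1)
  else c

def get_group_concentration_key_py_alt (numbers : List Int) : String :=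
  let counts := numbers.foldl pvStepB (0, 0, 0, 0, 0)
  PySem.Str.join "-"
    (([counts.1, counts.2.1, counts.2.2.1, counts.2.2.2.1, counts.2.2.2.2]).map PySem.Int.toStr)

-- ===== PRECONDITION & SPEC =====
def Spec_get_group_concentration_key_py (numbers : List Int) (out : String) : Prop := out = get_group_concentration_key_py_alt numbers
instance (numbers : List Int) (out : String) : Decidable (Spec_get_group_concentration_key_py numbers out) := by unfold Spec_get_group_concentration_key_py; infer_instance

-- ===== CLAIM (what is proved, stated in full; the proofs are below) =====
def Claim_equal_get_group_concentration_key_py : Prop := ∀ (numbers : List Int), Dom_get_group_concentration_key_py numbers → Spec_get_group_concentration_key_py numbers (get_group_concentration_key_py numbers)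

-- ===== LEMMAS AND PROOFS =====

-- the single-pass fold computes the five independent counting folds componentwise
theorem pvFoldB (numbers : List Int) (a b c d e : Int) :
    numbers.foldl pvStepB (a, b, c, d, e) =
      (numbers.foldl (fun acc n => if 1 ≤ n ∧ n ≤ 10 then acc + 1 else acc) a,
       numbers.foldl (fun acc n => if 11 ≤ n ∧ n ≤ 20 then acc + 1 else acc) b,
       numbers.foldl (fun acc n => if 21 ≤ n ∧ n ≤ 30 then acc + 1 else acc) c,
       numbers.foldl (fun acc n => if 31 ≤ n ∧ n ≤ 40 then acc + 1 else acc) d,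
       numbers.foldl (fun acc n => if 41 ≤ n ∧ n ≤ 45 then acc + 1 else acc) e) := by
  induction numbers generalizing a b c d e with
  | nil => rfl
  | cons x xs ih =>
    simp only [List.foldl_cons, pvStepB]
    split_ifs <;> simp only [ih] <;> first | rfl | omega

-- the A-side dict/sorted-keys/join pipeline, with the five counts abstracted, is the plain join of the five counts
theorem pvAside (v1 v2 v3 v4 v5 : Int) :
    (PySem.Str.join "-"
      ((PySem.List.sorted
          (PySem.Dict.ofList [("1-10", v1), ("11-20", v2), ("21-30", v3), ("31-40", v4), ("41-45", v5)] : PySem.Dict String Int).keys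
          (fun k => k) false).map
        (fun key =>
          PySem.Int.toStr
            ((PySem.Dict.ofList [("1-10", v1), ("11-20", v2), ("21-30", v3), ("31-40", v4), ("41-45", v5)] : PySem.Dict String Int).getD key 0))))
    = PySem.Str.join "-" (List.map PySem.Int.toStr [v1, v2, v3, v4, v5]) := by
  have hk : (PySem.Dict.ofList [("1-10", v1), ("11-20", v2), ("21-30", v3), ("31-40", v4), ("41-45", v5)] : PySem.Dict String Int).keys
      = ["1-10", "11-20", "21-30", "31-40", "41-45"] := rfl
  have hs : PySem.List.sorted ["1-10", "11-20", "21-30", "31-40", "41-45"] (fun k : String => k) false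
      = ["1-10", "11-20", "21-30", "31-40", "41-45"] := by
    apply PySem.List.sorted_eq_self_of_pairwise
    simp only [List.pairwise_cons, List.mem_cons, List.not_mem_nil, or_false,
      forall_eq_or_imp, forall_eq]
    and_intros <;> first
      | (rw [String.le_iff_toList_le]; decide)
      | simp
  rw [hk, hs]
  simp only [List.map]
  rw [show (PySem.Dict.ofList [("1-10", v1), ("11-20", v2), ("21-30", v3), ("31-40", v4), ("41-45", v5)] : PySem.Dict String Int).getD "1-10" 0 = v1 from rfl,
     show (PySem.Dict.ofList [("1-10", v1), ("11-20", v2), ("21-30", v3), ("31-40", v4), ("41-45", v5)] : PySem.Dict String Int).getD "11-20" 0 = v2 from rfl,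
     show (PySem.Dict.ofList [("1-10", v1), ("11-20", v2), ("21-30", v3), ("31-40", v4), ("41-45", v5)] : PySem.Dict String Int).getD "21-30" 0 = v3 from rfl,
     show (PySem.Dict.ofList [("1-10", v1), ("11-20", v2), ("21-30", v3), ("31-40", v4), ("41-45", v5)] : PySem.Dict String Int).getD "31-40" 0 = v4 from rfl,
     show (PySem.Dict.ofList [("1-10", v1), ("11-20", v2), ("21-30", v3), ("31-40", v4), ("41-45", v5)] : PySem.Dict String Int).getD "41-45" 0 = v5 from rfl]

-- ===== VERDICT (by name: the statement is the Claim_ definition above) =====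
theorem get_group_concentration_key_py_spec : Claim_equal_get_group_concentration_key_py := by
  intro numbers _
  unfold Spec_get_group_concentration_key_py get_group_concentration_key_py get_group_concentration_key_py_alt
  rw [pvFoldB]
  exact pvAside _ _ _ _ _
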